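-- pv_equiv track=rewrite | github.com/btclib-org/btclib | btclib/ecc/curve_group_2.py | wNAF_of_m
-- ===== SOURCE A (Python) =====
-- from typing import List, Tuple
--
-- def mods(m: int, w: int) -> int:
--     "Signed modulo function."
--
--     w2 = pow(2, w)
--     M = m % w2
--     return M - w2 if M >= (w2 / 2) else M
--
-- def wNAF_of_m(m: int, w: int) -> List[int]:
--     """wNAF (width-w Non-adjacent form) of number m
--
--     Given an integer m, wNAF is a method of rapresentation
--     with powers of 2, where the coefficients are odd or 0,
--     and where at most one of any w consecutive digits is nonzero.
--     It has the following propreties: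
--     - m has a unique width-w NAF.
--     -The length of wNAF(m) is at most one more than the length of the binary
--     representation of k.
--     -The average density of nonzero digits is approximately 1/(w + 1).
--
--     For complete reference see:
--     D. Hankerson, 'Guide to Elliptic Curve Cryptography' chapter 3
--     """
--
--     i = 0
--
--     M: List[int] = []
--     while m > 0:
--         if (m % 2) == 1:
--             if w == 1:
--                 # Computing binary NAF of m
--                 M.append(2 - (m % 4))
--             else:
--                 # Computing wNAF of m
--                 M.append(mods(m, w))
--             m -= M[i]
--         else:
--             M.append(0)
--         m //= 2
--         i += 1
--
--     return M
-- ===== SOURCE B (Python) =====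
-- from typing import List
--
--
-- def mods(m: int, w: int) -> int:
--     "Signed modulo function."
--
--     w2 = pow(2, w)
--     M = m % w2
--     return M - w2 if M >= (w2 / 2) else M
--
--
-- def wNAF_of_m(m: int, w: int) -> List[int]:
--     """wNAF of m, emitting a whole width-w block per nonzero digit.
--
--     After a nonzero digit d is emitted, m - d is divisible by 2**w, so the
--     next w - 1 digits are zeros: append them as one block and shift by w.
--     """
--     M: List[int] = []
--     while m > 0:
--         if m % 2 == 0:
--             M.append(0)
--             m >>= 1
--         else:
--             d = 2 - (m % 4) if w == 1 else mods(m, w)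
--             M.append(d)
--             m -= d
--             if m:
--                 M.extend([0] * (w - 1))
--             m >>= w
--     return M
-- ===== Notes on version B (the rewrite author's own statement) =====
-- stated objective: alternative
-- what changed: After emitting each nonzero digit d, B uses that m-d is divisible by 2^w to append the whole block of w-1 guaranteed zero digits at once and shift m right by w, instead of A's one-bit-per-iteration scan that re-tests parity for every zero.
-- outside the precondition, e.g. on wNAF_of_m(5, 0): A returns [0, 0, 0], B does not finish within the time limit; on wNAF_of_m(4, -1): A returns [0, 0, 0.0], B raises TypeError
import Mathlib
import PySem

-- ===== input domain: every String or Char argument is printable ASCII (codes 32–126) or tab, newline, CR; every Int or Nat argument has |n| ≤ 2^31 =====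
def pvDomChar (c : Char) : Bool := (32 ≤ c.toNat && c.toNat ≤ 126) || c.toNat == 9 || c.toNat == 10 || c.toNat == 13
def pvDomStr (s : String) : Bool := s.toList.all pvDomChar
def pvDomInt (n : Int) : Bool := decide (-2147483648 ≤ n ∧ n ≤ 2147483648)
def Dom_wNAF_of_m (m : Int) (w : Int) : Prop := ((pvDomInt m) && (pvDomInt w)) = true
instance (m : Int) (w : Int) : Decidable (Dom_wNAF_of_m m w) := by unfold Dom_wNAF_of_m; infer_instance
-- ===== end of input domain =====

-- B emits, after each nonzero digit d, the whole block of w-1 guaranteed-zero digits at once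
-- and shifts m right by w, instead of A's one-bit-per-iteration scan (objective: alternative).

-- ===== PORT A =====
-- mods(m, w): 'M >= w2 / 2' is ported as '2 * M ≥ w2', exact over the integers because w2 = 2^w
-- (Pre_ keeps 1 ≤ w ≤ 1024, where Python's float w2/2 is the exact value 2^(w-1)).
def mods (m : Int) (w : Int) : Int :=
  let w2 : Int := 2 ^ w.toNat        -- pow(2, w); exact for 0 ≤ w (w < 0 is outside Pre_)
  let M := PySem.Int.mod m w2
  if 2 * M ≥ w2 then M - w2 else M

-- decrease facts for A's while loop, cited by its decreasing_by
theorem wnaf_digit_bounds (m w : Int) (hm : 0 < m) (hodd : PySem.Int.mod m 2 = 1) :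
    0 ≤ m - (if w = 1 then 2 - PySem.Int.mod m 4 else mods m w) ∧
      m - (if w = 1 then 2 - PySem.Int.mod m 4 else mods m w) < 2 * m := by
  have hodd' : m % 2 = 1 := by
    rwa [PySem.Int.mod_eq_emod_of_pos (by norm_num : (0:Int) < 2)] at hodd
  by_cases hw : w = 1
  · subst hw
    rw [if_pos rfl, PySem.Int.mod_eq_emod_of_pos (by norm_num : (0:Int) < 4)]
    constructor <;> omega
  · simp only [if_neg hw, mods]
    set w2 : Int := 2 ^ w.toNat with hw2def
    set M := PySem.Int.mod m w2 with hMdef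
    have hw2pos : 0 < w2 := pow_pos (by norm_num) _
    have hM0 : 0 ≤ M := PySem.Int.mod_nonneg _ hw2pos
    have hMlt : M < w2 := PySem.Int.mod_lt _ hw2pos
    have heq : PySem.Int.floordiv m w2 * w2 + M = m := PySem.Int.floordiv_mul_add_mod m w2
    have hq0 : 0 ≤ PySem.Int.floordiv m w2 := by
      rw [PySem.Int.floordiv_eq_ediv_of_pos hw2pos]
      exact Int.ediv_nonneg hm.le hw2pos.le
    have hp0 : 0 ≤ PySem.Int.floordiv m w2 * w2 := mul_nonneg hq0 hw2pos.le
    have ht : w.toNat = 0 ∨ 2 ≤ w.toNat := by omega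
    rcases ht with h0 | h2
    · have hw21 : w2 = 1 := by rw [hw2def, h0, pow_zero]
      split_ifs with hge <;> omega
    · have h4 : (4 : Int) ∣ w2 := by
        rw [hw2def]
        have := pow_dvd_pow (2 : Int) h2
        norm_num at this
        exact this
      have h2p : (2 : Int) ∣ PySem.Int.floordiv m w2 * w2 :=
        Dvd.dvd.mul_left (dvd_trans (by norm_num) h4) _
      generalize hgen : PySem.Int.floordiv m w2 * w2 = p at heq hp0 h2p
      split_ifs with hge <;> omega

theorem wnaf_odd_step_lt (m w : Int) (hm : 0 < m) (hodd : PySem.Int.mod m 2 = 1) :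
    (PySem.Int.floordiv (m - (if w = 1 then 2 - PySem.Int.mod m 4 else mods m w)) 2).toNat
      < m.toNat := by
  obtain ⟨h0, h2m⟩ := wnaf_digit_bounds m w hm hodd
  have hlt : PySem.Int.floordiv (m - (if w = 1 then 2 - PySem.Int.mod m 4 else mods m w)) 2 < m :=
    (PySem.Int.floordiv_lt_iff_lt_mul (by norm_num)).mpr (by omega)
  omega

theorem wnaf_even_step_lt (m : Int) (hm : 0 < m) : (PySem.Int.floordiv m 2).toNat < m.toNat := by
  have hlt : PySem.Int.floordiv m 2 < m :=
    (PySem.Int.floordiv_lt_iff_lt_mul (by norm_num)).mpr (by omega)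
  have h0 : 0 ≤ PySem.Int.floordiv m 2 := by
    rw [PySem.Int.floordiv_eq_ediv_of_pos (by norm_num : (0:Int) < 2)]
    exact Int.ediv_nonneg hm.le (by norm_num)
  omega

-- the while loop of A: one digit per bit of m
def wNAFloopA (m : Int) (w : Int) : List Int :=
  if hm : 0 < m then
    if hodd : PySem.Int.mod m 2 = 1 then
      (if w = 1 then 2 - PySem.Int.mod m 4 else mods m w) ::
        wNAFloopA (PySem.Int.floordiv
          (m - (if w = 1 then 2 - PySem.Int.mod m 4 else mods m w)) 2) w
    else
      0 :: wNAFloopA (PySem.Int.floordiv m 2) w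
  else []
termination_by m.toNat
decreasing_by
  · exact wnaf_odd_step_lt m w hm hodd
  · exact wnaf_even_step_lt m hm

def wNAF_of_m (m : Int) (w : Int) : List Int := wNAFloopA m w

-- ===== PORT B =====
-- Source B's while loop; fuel only makes it total (Source B diverges at w = 0 with m > 0, outside Pre_);
-- m.toNat + 1 iterations always suffice inside Pre_ since m strictly decreases.
def wNAFloopB : Nat → Int → Int → List Int
  | 0, _, _ => []
  | fuel + 1, m, w =>
    if 0 < m then
      if PySem.Int.mod m 2 = 0 then
        0 :: wNAFloopB fuel (m >>> (1 : Nat)) w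
      else
        let d := if w = 1 then 2 - PySem.Int.mod m 4 else mods m w
        let m' := m - d
        d :: ((if m' = 0 then [] else List.replicate (w - 1).toNat 0) ++
              wNAFloopB fuel (m' >>> w.toNat) w)    -- m >>= w; w ≥ 1 inside Pre_
    else []

def wNAF_of_m_alt (m : Int) (w : Int) : List Int := wNAFloopB (m.toNat + 1) m w

-- ===== PRECONDITION & SPEC =====
-- Pre_ excludes (for m > 0) w ≤ 0, where A returns degenerate lists that are not width-w NAFs
-- (all-zero digits for w = 0, float-valued entries for w < 0, so not List[int]), and w > 1024,
-- where A raises OverflowError converting 2^w / 2 to float inside mods.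
def Pre_wNAF_of_m (m : Int) (w : Int) : Prop := m ≤ 0 ∨ (1 ≤ w ∧ w ≤ 1024)
instance (m : Int) (w : Int) : Decidable (Pre_wNAF_of_m m w) := by
  unfold Pre_wNAF_of_m; infer_instance

def pvWitness_wNAF_of_m : Int × Int := (7, 2)

def Spec_wNAF_of_m (m : Int) (w : Int) (out : List Int) : Prop := out = wNAF_of_m_alt m w
instance (m : Int) (w : Int) (out : List Int) : Decidable (Spec_wNAF_of_m m w out) := by
  unfold Spec_wNAF_of_m; infer_instance

-- ===== CLAIM (what is proved, stated in full; the proofs are below) =====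
def Claim_equal_wNAF_of_m : Prop :=
  ∀ (m : Int) (w : Int), Dom_wNAF_of_m m w → Pre_wNAF_of_m m w →
    Spec_wNAF_of_m m w (wNAF_of_m m w)


-- ===== LEMMAS AND PROOFS =====

-- Python '>>' on a nonnegative int is division by a power of two
theorem pv_shr_nonneg (x : Int) (n : Nat) (hx : 0 ≤ x) : x >>> n = x / 2 ^ n := by
  obtain ⟨a, rfl⟩ := Int.eq_ofNat_of_zero_le hx
  have h1 : (a : Int) >>> n = ((a >>> n : Nat) : Int) := rfl
  rw [h1, Nat.shiftRight_eq_div_pow]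
  push_cast
  ring

theorem loopA_nonpos (m w : Int) (hm : ¬ 0 < m) : wNAFloopA m w = [] := by
  rw [wNAFloopA, dif_neg hm]

theorem loopB_zero (fuel : Nat) (w : Int) : wNAFloopB fuel 0 w = [] := by
  cases fuel <;> simp [wNAFloopB]

-- the nonzero digit is congruent to m modulo 2^w, so 2^w divides m - d
theorem wnaf_digit_dvd (m w : Int) (hw : 1 ≤ w) (hodd : PySem.Int.mod m 2 = 1) :
    (2 ^ w.toNat : Int) ∣ (m - (if w = 1 then 2 - PySem.Int.mod m 4 else mods m w)) := by
  by_cases hw1 : w = 1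
  · subst hw1
    rw [if_pos rfl, PySem.Int.mod_eq_emod_of_pos (by norm_num : (0:Int) < 4)]
    have hodd' : m % 2 = 1 := by
      rwa [PySem.Int.mod_eq_emod_of_pos (by norm_num : (0:Int) < 2)] at hodd
    have : ((1:Int).toNat) = 1 := rfl
    rw [this, pow_one]
    omega
  · rw [if_neg hw1]
    simp only [mods]
    set w2 : Int := 2 ^ w.toNat with hw2def
    set M := PySem.Int.mod m w2 with hMdef
    have heq : PySem.Int.floordiv m w2 * w2 + M = m := PySem.Int.floordiv_mul_add_mod m w2
    split_ifs with hge
    · exact ⟨PySem.Int.floordiv m w2 + 1, by linear_combination - heq⟩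
    · exact ⟨PySem.Int.floordiv m w2, by linear_combination - heq⟩

-- A emits k zeros, one bit at a time, while 2^k divides the remaining m
theorem loopA_strip_zeros (w : Int) (k : Nat) : ∀ (n : Int), 0 < n → (2 ^ k : Int) ∣ n →
    wNAFloopA n w = List.replicate k 0 ++ wNAFloopA (n / 2 ^ k) w := by
  induction k with
  | zero => intro n hn _; simp
  | succ k ih =>
    intro n hn hdvd
    obtain ⟨c, hc⟩ := hdvd
    have hcpos : 0 < c := by
      by_contra hc0
      have : (2:Int) ^ (k+1) * c ≤ 0 :=
        mul_nonpos_of_nonneg_of_nonpos (by positivity) (by omega)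
      omega
    have h2 : PySem.Int.mod n 2 = 0 :=
      (PySem.Int.mod_eq_zero_iff_dvd n 2).mpr ⟨2 ^ k * c, by rw [hc]; ring⟩
    rw [wNAFloopA, dif_pos hn, dif_neg (by omega : ¬ PySem.Int.mod n 2 = 1)]
    have hfd : PySem.Int.floordiv n 2 = 2 ^ k * c := by
      rw [PySem.Int.floordiv_eq_ediv_of_pos (by norm_num : (0:Int) < 2), hc,
        show (2:Int) ^ (k+1) * c = 2 * (2 ^ k * c) by ring]
      exact Int.mul_ediv_cancel_left _ (by norm_num)
    have hpos' : 0 < (2:Int) ^ k * c := by positivity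
    rw [hfd, ih _ hpos' ⟨c, rfl⟩, Int.mul_ediv_cancel_left _ (by positivity : ((2:Int)^k) ≠ 0),
      show n / 2 ^ (k+1) = c by rw [hc]; exact Int.mul_ediv_cancel_left _ (by positivity)]
    simp [List.replicate_succ]

-- main invariant: with enough fuel (m strictly decreases each iteration) B's loop equals A's
theorem loopB_eq_loopA : ∀ (fuel : Nat) (m w : Int), m.toNat < fuel → 1 ≤ w →
    wNAFloopB fuel m w = wNAFloopA m w := by
  intro fuel
  induction fuel with
  | zero => intro m w h _; exact absurd h (Nat.not_lt_zero _)
  | succ fuel ih =>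
    intro m w hfuel hw
    by_cases hm : 0 < m
    · have hmod01 : PySem.Int.mod m 2 = 0 ∨ PySem.Int.mod m 2 = 1 := by
        have h1 := PySem.Int.mod_nonneg m (show (0:Int) < 2 by norm_num)
        have h2 := PySem.Int.mod_lt m (show (0:Int) < 2 by norm_num)
        omega
      rcases hmod01 with he | ho
      · -- even: both append one 0 and halve
        simp only [wNAFloopB]
        rw [if_pos hm, if_pos he, wNAFloopA, dif_pos hm,
          dif_neg (by omega : ¬ PySem.Int.mod m 2 = 1)]
        have hsh : m >>> (1:Nat) = PySem.Int.floordiv m 2 := by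
          rw [pv_shr_nonneg m 1 hm.le, PySem.Int.floordiv_eq_ediv_of_pos (by norm_num : (0:Int) < 2),
            pow_one]
        rw [hsh, ih _ _ (by have := wnaf_even_step_lt m hm; omega) hw]
      · -- odd: B emits the digit plus its zero block, A emits them bit by bit
        simp only [wNAFloopB]
        rw [if_pos hm, if_neg (by omega : ¬ PySem.Int.mod m 2 = 0), wNAFloopA, dif_pos hm,
          dif_pos ho]
        set d := if w = 1 then 2 - PySem.Int.mod m 4 else mods m w with hd
        obtain ⟨hge0, hlt2m⟩ := wnaf_digit_bounds m w hm ho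
        have hdvd : (2 ^ w.toNat : Int) ∣ (m - d) := wnaf_digit_dvd m w hw ho
        by_cases hz : m - d = 0
        · rw [if_pos hz, hz]
          have h0sh : (0:Int) >>> w.toNat = 0 := by simp
          rw [h0sh, loopB_zero,
            show PySem.Int.floordiv 0 2 = 0 by
              rw [PySem.Int.floordiv_eq_ediv_of_pos (by norm_num : (0:Int) < 2)]; simp,
            loopA_nonpos _ _ (by norm_num)]
          simp
        · rw [if_neg hz]
          have hmdpos : 0 < m - d := lt_of_le_of_ne hge0 (Ne.symm hz)
          set t := w.toNat with htdef
          have ht1 : 1 ≤ t := by omega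
          obtain ⟨c, hc⟩ := hdvd
          have hcpos : 0 < c := by
            by_contra hc0
            have : (2:Int) ^ t * c ≤ 0 :=
              mul_nonpos_of_nonneg_of_nonpos (by positivity) (by omega)
            omega
          have hshift : (m - d) >>> t = c := by
            rw [pv_shr_nonneg _ _ hge0, hc]
            exact Int.mul_ediv_cancel_left _ (by positivity)
          have hpow : (2:Int) ^ t = 2 * 2 ^ (t - 1) := by
            conv_lhs => rw [show t = 1 + (t - 1) by omega]
            rw [pow_add, pow_one]
          have hfd : PySem.Int.floordiv (m - d) 2 = 2 ^ (t - 1) * c := by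
            rw [PySem.Int.floordiv_eq_ediv_of_pos (by norm_num : (0:Int) < 2), hc, hpow,
              mul_assoc]
            exact Int.mul_ediv_cancel_left _ (by norm_num)
          have hfdlt : (2:Int) ^ (t - 1) * c < m := by
            have := (PySem.Int.floordiv_lt_iff_lt_mul
              (show (0:Int) < 2 by norm_num)).mpr (show m - d < m * 2 by omega)
            omega
          have hcle : c ≤ (2:Int) ^ (t - 1) * c :=
            le_mul_of_one_le_left hcpos.le (one_le_pow₀ (by norm_num))
          rw [hshift, hfd,
            loopA_strip_zeros w (t - 1) (2 ^ (t - 1) * c) (by positivity) ⟨c, rfl⟩,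
            Int.mul_ediv_cancel_left _ (by positivity : ((2:Int) ^ (t - 1)) ≠ 0),
            show (w - 1).toNat = t - 1 by omega,
            ih c w (by omega) hw]
    · simp only [wNAFloopB]
      rw [if_neg hm, loopA_nonpos _ _ hm]

-- ===== VERDICT (by name: the statement is the Claim_ definition above) =====
theorem wNAF_of_m_spec : Claim_equal_wNAF_of_m := by
  intro m w _ hpre
  unfold Spec_wNAF_of_m wNAF_of_m wNAF_of_m_alt
  rcases hpre with hm | ⟨hw1, _⟩
  · rw [loopA_nonpos _ _ (by omega)]
    simp only [wNAFloopB]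
    rw [if_neg (by omega : ¬ 0 < m)]
  · exact (loopB_eq_loopA (m.toNat + 1) m w (by omega) hw1).symm
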